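-- pv_equiv track=rewrite | github.com/rhluttmer/Playfair-Cipher-Term-Project | playfairGraphics.py | findEndOfKeyWord
-- ===== SOURCE A (Python) =====
-- def findEndOfKeyWord(L):
--     lastLetter = chr(ord('A') - 1)
--     afterEndRow = 0
--     afterEndCol = 0
--
--     for row in range(len(L)):
--         for col in range(len(L[0])):
--             newLetter = L[row][col]
--             if newLetter < lastLetter:
--                 afterEndRow, afterEndCol = row, col
--             lastLetter = newLetter
--
--     return afterEndRow, afterEndCol
-- ===== SOURCE B (Python) =====
-- def findEndOfKeyWord(L):
--     if not L:
--         return (0, 0)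
--     width = len(L[0])
--     seq = [row[col] for row in L for col in range(width)]
--     last = chr(ord('A') - 1)
--     for i in range(len(seq) - 1, -1, -1):
--         prev = seq[i - 1] if i > 0 else last
--         if seq[i] < prev:
--             return divmod(i, width)
--     return (0, 0)
-- ===== Notes on version B (the rewrite author's own statement) =====
-- stated objective: alternative
-- what changed: B flattens the grid row-major and scans it BACKWARDS with early exit, returning divmod of the first descent found from the end (= A's last descent), instead of A's forward nested row/col sweep that overwrites the answer at every descent.
import Mathlib
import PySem

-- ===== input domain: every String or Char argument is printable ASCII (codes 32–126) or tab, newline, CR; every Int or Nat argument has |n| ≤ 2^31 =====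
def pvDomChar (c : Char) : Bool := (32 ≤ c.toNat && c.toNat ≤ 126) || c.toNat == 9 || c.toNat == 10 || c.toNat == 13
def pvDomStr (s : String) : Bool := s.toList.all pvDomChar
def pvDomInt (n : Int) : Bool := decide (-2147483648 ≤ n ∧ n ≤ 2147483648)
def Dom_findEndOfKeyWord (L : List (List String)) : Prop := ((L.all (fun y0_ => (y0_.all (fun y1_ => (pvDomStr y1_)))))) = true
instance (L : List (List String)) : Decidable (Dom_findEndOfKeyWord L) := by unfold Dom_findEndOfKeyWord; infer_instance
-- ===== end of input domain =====

-- B scans the flattened grid backwards with early exit for the last descent instead of A's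
-- forward nested sweep; equal return value on all rectangular-enough grids (no mutation).

-- ===== PORT A =====
def findEndOfKeyWord (L : List (List String)) : Int × Int :=
  let res := (PySem.List.pyRange 0 (L.length) 1).foldl
    (fun (st : String × Int × Int) (row : Int) =>
      (PySem.List.pyRange 0 ((PySem.List.pyGetD L 0 []).length) 1).foldl
        (fun (st : String × Int × Int) (col : Int) =>
          let newLetter := PySem.List.pyGetD (PySem.List.pyGetD L row []) col ""
          if newLetter < st.1 then (newLetter, row, col) else (newLetter, st.2))
        st)
    ("@", 0, 0)
  res.2

-- ===== PORT B =====
-- the comprehension [row[col] for row in L for col in range(width)]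
def seqOf (L : List (List String)) (w : Nat) : List String :=
  L.flatMap (fun row => (List.range w).map (fun c => row.getD c ""))

-- the reverse loop 'for i in range(len(seq)-1, -1, -1)', structural countdown on i
def revFind (seq : List String) (w : Nat) : Nat → Int × Int
  | 0 => (0, 0)
  | i + 1 =>
    let prev := if i > 0 then seq.getD (i - 1) "" else "@"
    if seq.getD i "" < prev then (((i / w : Nat) : Int), ((i % w : Nat) : Int))
    else revFind seq w i

def findEndOfKeyWord_alt (L : List (List String)) : Int × Int :=
  match L with
  | [] => (0, 0)
  | r0 :: _ =>
    let width := r0.length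
    let seq := seqOf L width
    revFind seq width seq.length

-- ===== PRECONDITION & SPEC =====
-- Pre_ excludes exactly the ragged grids with a row shorter than the first row, on which
-- Python A raises IndexError (L[row][col] for col < len(L[0])); B raises there too.
def Pre_findEndOfKeyWord (L : List (List String)) : Prop :=
  ∀ row ∈ L, (L.headD []).length ≤ row.length
instance (L : List (List String)) : Decidable (Pre_findEndOfKeyWord L) := by
  unfold Pre_findEndOfKeyWord; infer_instance
def pvWitness_findEndOfKeyWord : List (List String) := [["A", "B"], ["C", "A"]]
def Spec_findEndOfKeyWord (L : List (List String)) (out : Int × Int) : Prop := out = findEndOfKeyWord_alt L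
instance (L : List (List String)) (out : Int × Int) : Decidable (Spec_findEndOfKeyWord L out) := by unfold Spec_findEndOfKeyWord; infer_instance

-- ===== CLAIM (what is proved, stated in full; the proofs are below) =====
def Claim_equal_findEndOfKeyWord : Prop := ∀ (L : List (List String)), Dom_findEndOfKeyWord L → Pre_findEndOfKeyWord L → Spec_findEndOfKeyWord L (findEndOfKeyWord L)

-- ===== LEMMAS AND PROOFS =====

def valAt (L : List (List String)) (r c : Nat) : String := (L.getD r []).getD c ""

def posOf (w i : Nat) : Int × Int := (((i / w : Nat) : Int), ((i % w : Nat) : Int))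

def pvStep (st : String × Int × Int) (q : String × (Int × Int)) : String × Int × Int :=
  (q.1, if q.1 < st.1 then q.2 else st.2)

def prevAt (g : Nat → String) (n : Nat) : String := if n = 0 then "@" else g (n - 1)

theorem foldl_flatMap' {α β γ : Type} (f : γ → β → γ) (g : α → List β) (l : List α) (init : γ) :
    (l.flatMap g).foldl f init = l.foldl (fun acc a => (g a).foldl f acc) init := by
  induction l generalizing init with
  | nil => rfl
  | cons x xs ih => simp [List.flatMap_cons, List.foldl_append, ih]

theorem lemAB (g : Nat → String) (p : Nat → Int × Int) (n : Nat) (acc : Int × Int) :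
    List.foldl pvStep ("@", acc) ((List.range n).map (fun i => (g i, p i))) =
    (prevAt g n, List.foldl (fun a i => if g i < prevAt g i then p i else a) acc (List.range n)) := by
  induction n with
  | zero => simp [prevAt]
  | succ m ih =>
    simp only [List.range_succ, List.map_append, List.foldl_append, ih, List.map_cons,
      List.map_nil, List.foldl_cons, List.foldl_nil]
    simp [pvStep, prevAt]

theorem lemR (seq : List String) (w : Nat) (n : Nat) :
    revFind seq w n =
    List.foldl (fun a i => if seq.getD i "" < prevAt (fun j => seq.getD j "") i then posOf w i else a)
      (0, 0) (List.range n) := by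
  induction n with
  | zero => rfl
  | succ m ih =>
    simp only [List.range_succ, List.foldl_append, List.foldl_cons, List.foldl_nil, ← ih]
    show (let prev := if m > 0 then seq.getD (m - 1) "" else "@"
          if seq.getD m "" < prev then (((m / w : Nat) : Int), ((m % w : Nat) : Int))
          else revFind seq w m) = _
    rcases Nat.eq_zero_or_pos m with hm | hm
    · subst hm; simp [prevAt, posOf]
    · have hne : m ≠ 0 := Nat.pos_iff_ne_zero.mp hm
      simp [prevAt, posOf, hm, hne]

theorem lemLEN (L : List (List String)) (w : Nat) : (seqOf L w).length = L.length * w := by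
  induction L with
  | nil => simp [seqOf]
  | cons r rest ih =>
    simp only [seqOf, List.flatMap_cons, List.length_append, List.length_map, List.length_range,
      List.length_cons] at *
    rw [ih]; ring

theorem lemVAL (L : List (List String)) (w : Nat) (i : Nat) (h : i < L.length * w) :
    (seqOf L w).getD i "" = valAt L (i / w) (i % w) := by
  induction L generalizing i with
  | nil => simp at h
  | cons r rest ih =>
    simp only [seqOf, List.flatMap_cons] at *
    simp only [List.length_cons, Nat.succ_mul] at h
    by_cases hi : i < w
    · rw [List.getD_append _ _ _ _ (by simpa using hi)]
      rw [Nat.div_eq_of_lt hi, Nat.mod_eq_of_lt hi]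
      simp [valAt, List.getD_eq_getElem?_getD, hi]
    · push_neg at hi
      rcases Nat.eq_zero_or_pos w with rfl | hw
      · simp at h
      · obtain ⟨j, rfl⟩ : ∃ j, i = j + w := ⟨i - w, by omega⟩
        rw [List.getD_append_right _ _ _ _ (by simpa using Nat.le_add_left w j)]
        simp only [List.length_map, List.length_range, Nat.add_sub_cancel]
        rw [ih j (by omega)]
        rw [Nat.add_div_right j hw, Nat.add_mod_right]
        simp [valAt]

theorem lemPAIRS (L : List (List String)) (w : Nat) (m : Nat) (hm : m ≤ L.length) :
    (List.range m).flatMap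
      (fun r => (List.range w).map (fun c => (valAt L r c, ((r : Int), (c : Int))))) =
    (List.range (m * w)).map (fun i => ((seqOf L w).getD i "", posOf w i)) := by
  induction m with
  | zero => simp
  | succ k ih =>
    rw [List.range_succ, List.flatMap_append, ih (by omega)]
    have hsq : (k + 1) * w = k * w + w := by ring
    rw [hsq, List.range_add, List.map_append, List.map_map]
    congr 1
    simp only [List.flatMap_cons, List.flatMap_nil, List.append_nil]
    apply List.map_congr_left
    intro c hc
    have hcw : c < w := List.mem_range.mp hc
    have hw : 0 < w := by omega
    have hlt : k * w + c < L.length * w := by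
      have h1 : k * w + c < (k + 1) * w := by nlinarith
      have hle : (k + 1) * w ≤ L.length * w := Nat.mul_le_mul_right w hm
      omega
    rw [Function.comp_apply, lemVAL L w _ hlt]
    have hdiv : (k * w + c) / w = k := by
      rw [Nat.add_comm, Nat.add_mul_div_right _ _ hw]
      simp [Nat.div_eq_of_lt hcw]
    have hmod : (k * w + c) % w = c := by
      rw [Nat.add_comm, Nat.add_mul_mod_self_right]
      exact Nat.mod_eq_of_lt hcw
    simp [posOf, hdiv, hmod]

-- ===== VERDICT (by name: the statement is the Claim_ definition above) =====
theorem findEndOfKeyWord_spec : Claim_equal_findEndOfKeyWord := by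
  intro L _ _
  unfold Spec_findEndOfKeyWord
  match L with
  | [] => rfl
  | r0 :: rest =>
    show findEndOfKeyWord (r0 :: rest) = _
    set LL := r0 :: rest with hLL
    set w := r0.length with hw
    have hA : findEndOfKeyWord LL =
        (List.foldl pvStep ("@", (0, 0))
          ((List.range (LL.length * w)).map
            (fun i => ((seqOf LL w).getD i "", posOf w i)))).2 := by
      rw [← lemPAIRS LL w LL.length (le_refl _)]
      rw [foldl_flatMap']
      simp only [findEndOfKeyWord, PySem.List.pyRange_zero_nat, List.foldl_map,
        PySem.List.pyGetD_natCast, PySem.List.pyGetD_zero]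
      have hhead : (LL.getD 0 []).length = w := by simp [hLL, hw]
      rw [hhead]
      congr 1
      congr 1
      funext st r
      congr 1
      funext st' c
      simp only [pvStep, valAt]
      split <;> rfl
    rw [hA, lemAB]
    show _ = revFind (seqOf LL w) w (seqOf LL w).length
    rw [lemR, lemLEN]
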